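-- pv_equiv track=rewrite | github.com/Sarkoxed/minesweeper | solver1.py | get_surrounding_box
-- ===== SOURCE A (Python) =====
-- def get_surrounding_box(i, j, dimensions):
--     box = [
--         [(i - 1, j - 1), (i - 1, j), (i - 1, j + 1)],
--         [(i, j - 1), (i, j), (i, j + 1)],
--         [(i + 1, j - 1), (i + 1, j), (i + 1, j + 1)],
--     ]
--     if i == 0:
--         box = box[1:]
--     elif i == dimensions[0] - 1:
--         box = box[:-1]
--
--     if j == 0:
--         box = [x[1:] for x in box]
--     elif j == dimensions[1] - 1:
--         box = [x[:-1] for x in box]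
--
--     return box
-- ===== SOURCE B (Python) =====
-- def get_surrounding_box(i, j, dimensions):
--     rs, re = i - 1, i + 1
--     if i == 0:
--         rs = i
--     elif i == dimensions[0] - 1:
--         re = i
--     cs, ce = j - 1, j + 1
--     if j == 0:
--         cs = j
--     elif j == dimensions[1] - 1:
--         ce = j
--     return [[(r, c) for c in range(cs, ce + 1)] for r in range(rs, re + 1)]
-- ===== Notes on version B (the rewrite author's own statement) =====
-- stated objective: alternative
-- what changed: B computes row/column index bounds with the same if/elif trimming and generates the coordinate grid directly from two ranges, instead of building the full 3x3 list of tuples and slicing rows/columns off it.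
import Mathlib
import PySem

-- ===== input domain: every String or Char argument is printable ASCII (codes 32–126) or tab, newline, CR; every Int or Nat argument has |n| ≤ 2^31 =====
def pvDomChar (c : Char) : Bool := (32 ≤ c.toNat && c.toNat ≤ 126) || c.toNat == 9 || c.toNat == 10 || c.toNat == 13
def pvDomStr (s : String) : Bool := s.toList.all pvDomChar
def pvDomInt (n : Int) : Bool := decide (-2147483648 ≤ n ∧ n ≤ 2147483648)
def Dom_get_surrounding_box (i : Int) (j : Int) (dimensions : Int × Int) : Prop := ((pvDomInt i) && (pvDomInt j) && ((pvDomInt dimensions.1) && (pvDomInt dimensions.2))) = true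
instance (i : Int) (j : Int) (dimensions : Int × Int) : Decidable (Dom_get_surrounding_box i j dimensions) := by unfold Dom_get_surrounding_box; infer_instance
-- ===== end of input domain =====

-- ===== PORT A =====
-- B builds the surviving coordinate ranges directly instead of slicing a full 3x3 box (alternative decomposition).
def get_surrounding_box (i : Int) (j : Int) (dimensions : Int × Int) : List (List (Int × Int)) :=
  let box : List (List (Int × Int)) :=
    [[(i - 1, j - 1), (i - 1, j), (i - 1, j + 1)],
     [(i, j - 1), (i, j), (i, j + 1)],
     [(i + 1, j - 1), (i + 1, j), (i + 1, j + 1)]]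
  let box :=
    if i = 0 then PySem.List.slice box (some 1) none
    else if i = dimensions.1 - 1 then PySem.List.slice box none (some (-1))
    else box
  let box :=
    if j = 0 then box.map (fun x => PySem.List.slice x (some 1) none)
    else if j = dimensions.2 - 1 then box.map (fun x => PySem.List.slice x none (some (-1)))
    else box
  box

-- ===== PORT B =====
def get_surrounding_box_alt (i : Int) (j : Int) (dimensions : Int × Int) : List (List (Int × Int)) :=
  let rs := i - 1
  let re := i + 1
  let rs := if i = 0 then i else rs
  let re := if i ≠ 0 ∧ i = dimensions.1 - 1 then i else re
  let cs := j - 1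
  let ce := j + 1
  let cs := if j = 0 then j else cs
  let ce := if j ≠ 0 ∧ j = dimensions.2 - 1 then j else ce
  (PySem.List.pyRange rs (re + 1) 1).map
    (fun r => (PySem.List.pyRange cs (ce + 1) 1).map (fun c => (r, c)))
-- ===== PRECONDITION & SPEC =====
def Spec_get_surrounding_box (i : Int) (j : Int) (dimensions : Int × Int) (out : List (List (Int × Int))) : Prop := out = get_surrounding_box_alt i j dimensions
instance (i : Int) (j : Int) (dimensions : Int × Int) (out : List (List (Int × Int))) : Decidable (Spec_get_surrounding_box i j dimensions out) := by unfold Spec_get_surrounding_box; infer_instance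

-- ===== CLAIM (what is proved, stated in full; the proofs are below) =====
def Claim_equal_get_surrounding_box : Prop := ∀ (i : Int) (j : Int) (dimensions : Int × Int), Dom_get_surrounding_box i j dimensions → Spec_get_surrounding_box i j dimensions (get_surrounding_box i j dimensions)

-- ===== LEMMAS AND PROOFS =====
theorem pyRange_lo (a : Int) : PySem.List.pyRange a (a + 1 + 1) 1 = [a, a + 1] := by
  rw [PySem.List.pyRange_one]
  rw [show (a + 1 + 1 - a).toNat = 2 by omega]
  norm_num [List.range_succ]

theorem pyRange_hi (a : Int) : PySem.List.pyRange (a - 1) (a + 1) 1 = [a - 1, a] := by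
  rw [PySem.List.pyRange_one]
  rw [show (a + 1 - (a - 1)).toNat = 2 by omega]
  norm_num [List.range_succ]

theorem pyRange_mid (a : Int) : PySem.List.pyRange (a - 1) (a + 1 + 1) 1 = [a - 1, a, a + 1] := by
  rw [PySem.List.pyRange_one]
  rw [show (a + 1 + 1 - (a - 1)).toNat = 3 by omega]
  norm_num [List.range_succ]
  omega


-- ===== VERDICT (by name: the statement is the Claim_ definition above) =====
theorem get_surrounding_box_spec : Claim_equal_get_surrounding_box := by
  intro i j d _
  unfold Spec_get_surrounding_box get_surrounding_box get_surrounding_box_alt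
  split_ifs <;>
    first
      | (simp only [pyRange_lo, pyRange_hi, pyRange_mid]; rfl)
      | tauto
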